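-- pv_equiv track=rewrite | github.com/theptrk/arc-prize-2024 | synthesis.py | duplicate_into_bool_grid
-- ===== SOURCE A (Python) =====
-- def duplicate_into_bool_grid(bool_grid, pattern):
--     pat_n_rows = len(pattern)
--     pat_n_cols = len(pattern[0])
--     """
--     1 1 1
--     0 0 0
--     0 1 1
--     """
--     bool_n_rows = len(bool_grid)
--     bool_n_cols = len(bool_grid[0])
--     """
--     1 1 1
--     0 0 0
--     0 1 1
--     """
--     result_n_rows = pat_n_rows * bool_n_rows
--     result_n_cols = pat_n_cols * bool_n_cols
--     result_grid = [[0] * result_n_cols for _ in range(result_n_rows)]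
--
--     for i in range(0, result_n_rows, pat_n_rows):
--         for j in range(0, result_n_cols, pat_n_cols):
--             bool_grid_row = i // pat_n_rows
--             bool_grid_col = j // pat_n_cols
--             bool_grid_val = bool_grid[bool_grid_row][bool_grid_col]
--             if bool_grid_val == 0:
--                 continue
--
--             for paint_i in range(i, i + pat_n_rows):
--                 for paint_j in range(j, j + pat_n_cols):
--                     modi = paint_i % pat_n_rows
--                     modj = paint_j % pat_n_cols
--                     pat_val = pattern[modi][modj]
--                     result_grid[paint_i][paint_j] = pat_val
--
--     return result_grid
-- ===== SOURCE B (Python) =====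
-- def duplicate_into_bool_grid(bool_grid, pattern):
--     pat_n_rows = len(pattern)
--     pat_n_cols = len(pattern[0])
--     bool_n_cols = len(bool_grid[0])
--     zeros = [0] * pat_n_cols
--     result = []
--     for row in bool_grid:
--         cells = row[:bool_n_cols]
--         for pr in range(pat_n_rows):
--             prow = pattern[pr][:pat_n_cols]
--             out = []
--             for v in cells:
--                 out.extend(zeros if v == 0 else prow)
--             result.append(out)
--     return result
-- ===== Notes on version B (the rewrite author's own statement) =====
-- stated objective: simpler
-- what changed: B builds each output row directly in one pass over bool_grid rows (concatenating a pattern row or a zero block per bool cell), instead of A's pre-allocated zero grid mutated cell-by-cell with //, % index arithmetic.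
-- outside the precondition, e.g. on duplicate_into_bool_grid([[0]], [[1, 2], [3]]): A returns [[0, 0], [0, 0]], B returns [[0, 0], [0, 0]]
import Mathlib
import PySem

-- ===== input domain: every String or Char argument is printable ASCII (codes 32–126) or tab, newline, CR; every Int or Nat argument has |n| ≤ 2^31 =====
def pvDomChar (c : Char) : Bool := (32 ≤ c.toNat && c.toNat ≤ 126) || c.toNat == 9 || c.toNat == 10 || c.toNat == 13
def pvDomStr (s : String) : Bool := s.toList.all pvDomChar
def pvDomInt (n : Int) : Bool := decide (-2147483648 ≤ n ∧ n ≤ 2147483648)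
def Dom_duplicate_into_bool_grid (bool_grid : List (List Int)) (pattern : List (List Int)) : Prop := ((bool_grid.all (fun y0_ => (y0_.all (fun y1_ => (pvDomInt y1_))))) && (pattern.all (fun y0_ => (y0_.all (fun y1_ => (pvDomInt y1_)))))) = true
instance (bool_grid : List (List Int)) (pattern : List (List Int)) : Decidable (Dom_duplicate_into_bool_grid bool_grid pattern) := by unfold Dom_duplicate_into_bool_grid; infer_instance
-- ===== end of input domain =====

-- B builds each output row directly by concatenation per bool cell (simpler decomposition),
-- instead of A's pre-allocated zero grid mutated block-by-block with //, % index arithmetic.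


-- ===== PORT A =====
-- result_grid[paint_i][paint_j] = pat_val : inside A's loops both indices are nonnegative,
-- so .toNat is exact; an out-of-range index would leave the grid unchanged (Pre_ rules it out).

def pvSet2 (g : List (List Int)) (i j : Int) (v : Int) : List (List Int) :=
  g.modify i.toNat (fun row => row.set j.toNat v)

def duplicate_into_bool_grid (bool_grid : List (List Int)) (pattern : List (List Int)) : List (List Int) :=
  let pat_n_rows : Int := pattern.length
  let pat_n_cols : Int := ((PySem.List.pyGet? pattern 0).getD []).length
  let bool_n_rows : Int := bool_grid.length
  let bool_n_cols : Int := ((PySem.List.pyGet? bool_grid 0).getD []).length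
  let result_n_rows : Int := pat_n_rows * bool_n_rows
  let result_n_cols : Int := pat_n_cols * bool_n_cols
  let result_grid : List (List Int) :=
    (PySem.List.pyRange 0 result_n_rows 1).map (fun _ => List.replicate result_n_cols.toNat 0)
  (PySem.List.pyRange 0 result_n_rows pat_n_rows).foldl (fun g i =>
    (PySem.List.pyRange 0 result_n_cols pat_n_cols).foldl (fun g j =>
      let bool_grid_row := PySem.Int.floordiv i pat_n_rows
      let bool_grid_col := PySem.Int.floordiv j pat_n_cols
      let bool_grid_val := PySem.List.pyGetD ((PySem.List.pyGet? bool_grid bool_grid_row).getD []) bool_grid_col 0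
      if bool_grid_val = 0 then g
      else
        (PySem.List.pyRange i (i + pat_n_rows) 1).foldl (fun g paint_i =>
          (PySem.List.pyRange j (j + pat_n_cols) 1).foldl (fun g paint_j =>
            let modi := PySem.Int.mod paint_i pat_n_rows
            let modj := PySem.Int.mod paint_j pat_n_cols
            let pat_val := PySem.List.pyGetD ((PySem.List.pyGet? pattern modi).getD []) modj 0
            pvSet2 g paint_i paint_j pat_val) g) g) g) result_grid

-- ===== PORT B =====

def duplicate_into_bool_grid_alt (bool_grid : List (List Int)) (pattern : List (List Int)) : List (List Int) :=
  let pat_n_rows : Nat := pattern.length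
  let pat_n_cols : Nat := ((PySem.List.pyGet? pattern 0).getD []).length
  let bool_n_cols : Nat := ((PySem.List.pyGet? bool_grid 0).getD []).length
  let zeros : List Int := List.replicate pat_n_cols 0
  bool_grid.foldl (fun result row =>
    let cells := row.take bool_n_cols
    (List.range pat_n_rows).foldl (fun result pr =>
      let prow := (pattern.getD pr []).take pat_n_cols
      result ++ [cells.foldl (fun out v => out ++ (if v = 0 then zeros else prow)) []]) result) []

-- ===== PRECONDITION & SPEC =====
-- Pre_ excludes empty grids, an empty first pattern row (range step 0: ValueError) and grids
-- whose rows are shorter than their first row, on which A raises (IndexError / ValueError);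
-- a short pattern row is only read when some bool cell is nonzero, so on an all-zero
-- bool_grid with a short pattern row A still returns an all-zero grid — B returns the same
-- value there, the carve-out is merely not input-exact.
def Pre_duplicate_into_bool_grid (bool_grid : List (List Int)) (pattern : List (List Int)) : Prop :=
  bool_grid ≠ [] ∧ pattern ≠ [] ∧ 0 < (pattern.headI).length ∧
  (∀ row ∈ bool_grid, (bool_grid.headI).length ≤ row.length) ∧
  (∀ row ∈ pattern, (pattern.headI).length ≤ row.length)
instance (bool_grid : List (List Int)) (pattern : List (List Int)) : Decidable (Pre_duplicate_into_bool_grid bool_grid pattern) := by unfold Pre_duplicate_into_bool_grid; infer_instance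

def pvWitness_duplicate_into_bool_grid : List (List Int) × List (List Int) :=
  ([[1, 0], [0, 2]], [[1, 2], [3, 4]])

def Spec_duplicate_into_bool_grid (bool_grid : List (List Int)) (pattern : List (List Int)) (out : List (List Int)) : Prop := out = duplicate_into_bool_grid_alt bool_grid pattern
instance (bool_grid : List (List Int)) (pattern : List (List Int)) (out : List (List Int)) : Decidable (Spec_duplicate_into_bool_grid bool_grid pattern out) := by unfold Spec_duplicate_into_bool_grid; infer_instance

-- ===== CLAIM (what is proved, stated in full; the proofs are below) =====
def Claim_equal_duplicate_into_bool_grid : Prop := ∀ (bool_grid : List (List Int)) (pattern : List (List Int)), Dom_duplicate_into_bool_grid bool_grid pattern → Pre_duplicate_into_bool_grid bool_grid pattern → Spec_duplicate_into_bool_grid bool_grid pattern (duplicate_into_bool_grid bool_grid pattern)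

-- ===== LEMMAS AND PROOFS =====

def pvApply (g : List (List Int)) (us : List (Int × Int × Int)) : List (List Int) :=
  us.foldl (fun g u => pvSet2 g u.1 u.2.1 u.2.2) g

def pvHit : List (Int × Int × Int) → Int → Int → Option Int
  | [], _, _ => none
  | u :: us, p, q => (pvHit us p q).or (if u.1 = p ∧ u.2.1 = q then some u.2.2 else none)

def pvShape (g : List (List Int)) (m n : Nat) : Prop :=
  g.length = m ∧ ∀ t : Nat, t < m → (g.getD t []).length = n

theorem pvSet2_getD (g : List (List Int)) (i j : Int) (v : Int) (t : Nat) :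
    (pvSet2 g i j v).getD t [] =
      if i.toNat = t then (g.getD t []).set j.toNat v else g.getD t [] := by
  simp only [pvSet2, List.getD_eq_getElem?_getD, List.getElem?_modify]
  cases h : g[t]? <;> split <;> simp

theorem pvShape_set2 {g : List (List Int)} {m n : Nat} (hs : pvShape g m n)
    (i j v : Int) : pvShape (pvSet2 g i j v) m n := by
  refine ⟨by simpa [pvSet2] using hs.1, fun t ht => ?_⟩
  rw [pvSet2_getD]
  split <;> simp [← List.getD_eq_getElem?_getD, hs.2 t ht]

theorem pvSet2_ent {g : List (List Int)} {m n : Nat} (hs : pvShape g m n)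
    {i j : Int} (hi : 0 ≤ i ∧ i < (m : Int)) (hj : 0 ≤ j ∧ j < (n : Int)) (v : Int)
    {p q : Nat} (hp : p < m) (hq : q < n) :
    ((pvSet2 g i j v).getD p []).getD q 0 =
      if i = (p : Int) ∧ j = (q : Int) then v else (g.getD p []).getD q 0 := by
  rw [pvSet2_getD]
  have hrow : (g.getD p []).length = n := hs.2 p hp
  by_cases hip : i.toNat = p
  · have hie : i = (p : Int) := by omega
    simp only [if_pos hip]
    rw [List.getD_eq_getElem?_getD, List.getElem?_set]
    by_cases hjq : j.toNat = q
    · have hje : j = (q : Int) := by omega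
      simp [hje, hie, List.getD_eq_getElem?_getD, ← List.getD_eq_getElem?_getD, hrow, hq]
    · have hje : ¬ j = (q : Int) := by omega
      simp [hjq, hje, hie, List.getD_eq_getElem?_getD]
  · have hie : ¬ i = (p : Int) := by omega
    simp [hip, hie]

theorem pvApply_shape {m n : Nat} (us : List (Int × Int × Int)) :
    ∀ g : List (List Int), pvShape g m n → pvShape (pvApply g us) m n := by
  induction us with
  | nil => intro g hg; simpa [pvApply] using hg
  | cons u us ih =>
      intro g hg
      simpa [pvApply] using ih _ (pvShape_set2 hg u.1 u.2.1 u.2.2)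

theorem pvApply_ent {m n : Nat} (us : List (Int × Int × Int)) :
    ∀ g : List (List Int), pvShape g m n →
      (∀ u ∈ us, 0 ≤ u.1 ∧ u.1 < (m : Int) ∧ 0 ≤ u.2.1 ∧ u.2.1 < (n : Int)) →
      ∀ p q : Nat, p < m → q < n →
      ((pvApply g us).getD p []).getD q 0 =
        (pvHit us p q).getD ((g.getD p []).getD q 0) := by
  induction us with
  | nil => intro g _ _ p q _ _; simp [pvApply, pvHit]
  | cons u us ih =>
      intro g hg hus p q hp hq
      have hu := hus u (by simp)
      have step : ((pvApply (pvSet2 g u.1 u.2.1 u.2.2) us).getD p []).getD q 0 =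
          (pvHit us p q).getD (((pvSet2 g u.1 u.2.1 u.2.2).getD p []).getD q 0) :=
        ih _ (pvShape_set2 hg _ _ _) (fun w hw => hus w (by simp [hw])) p q hp hq
      have hent := pvSet2_ent hg ⟨hu.1, hu.2.1⟩ ⟨hu.2.2.1, hu.2.2.2⟩ u.2.2 hp hq
      show ((pvApply (pvSet2 g u.1 u.2.1 u.2.2) us).getD p []).getD q 0 = _
      rw [step, hent]
      show _ = ((pvHit us p q).or (if u.1 = (p:Int) ∧ u.2.1 = (q:Int) then some u.2.2 else none)).getD _
      cases pvHit us p q <;> split <;> simp_all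

theorem pvHit_append (us vs : List (Int × Int × Int)) (p q : Int) :
    pvHit (us ++ vs) p q = (pvHit vs p q).or (pvHit us p q) := by
  induction us with
  | nil => simp [pvHit]
  | cons u us ih =>
      show (pvHit (us ++ vs) p q).or _ = _
      rw [ih, Option.or_assoc]
      rfl

theorem pvHit_flatMap_none {α : Type} (L : List α) (f : α → List (Int × Int × Int))
    (p q : Int) (h : ∀ x ∈ L, pvHit (f x) p q = none) :
    pvHit (L.flatMap f) p q = none := by
  induction L with
  | nil => simp [pvHit]
  | cons a L ih =>
      rw [List.flatMap_cons, pvHit_append, ih (fun x hx => h x (by simp [hx])),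
        h a (by simp)]
      rfl

theorem pvHit_flatMap_range (f : Nat → List (Int × Int × Int)) (p q : Int) :
    ∀ (n x0 : Nat), x0 < n → (∀ x, x < n → x ≠ x0 → pvHit (f x) p q = none) →
    pvHit ((List.range n).flatMap f) p q = pvHit (f x0) p q := by
  intro n
  induction n with
  | zero => intro x0 h; omega
  | succ m ih =>
      intro x0 hx hother
      rw [List.range_succ, List.flatMap_append, pvHit_append]
      have hsing : pvHit ([m].flatMap f) p q = pvHit (f m) p q := by simp [pvHit_append, pvHit]
      rw [hsing]
      by_cases hx0 : x0 = m
      · subst hx0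
        rw [pvHit_flatMap_none _ _ _ _ (fun x hxm => hother x (by simp at hxm; omega) (by simp at hxm; omega))]
        · cases pvHit (f x0) p q <;> rfl
      · rw [hother m (by omega) (by omega), Option.none_or]
        exact ih x0 (by omega) (fun x h1 h2 => hother x (by omega) h2)

theorem pv_flatMap_const_length {α β : Type} (L : List α) (f : α → List β) (K : Nat)
    (h : ∀ x ∈ L, (f x).length = K) : (L.flatMap f).length = L.length * K := by
  induction L with
  | nil => simp
  | cons a L ih =>
      simp only [List.flatMap_cons, List.length_append, List.length_cons,
        h a (by simp), ih (fun x hx => h x (by simp [hx]))]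
      ring

theorem pv_flatMap_const_getD {α : Type} (L : List α) (f : α → List (List Int))
    (K : Nat) (h : ∀ x ∈ L, (f x).length = K) :
    ∀ (t k : Nat) (ht : t < L.length), k < K →
      (L.flatMap f).getD (t * K + k) [] = (f L[t]).getD k [] := by
  induction L with
  | nil => intro t k ht; simp at ht
  | cons a L ih =>
      intro t k ht hk
      rw [List.flatMap_cons]
      cases t with
      | zero =>
          rw [List.getD_append]
          · simp
          · rw [h a (by simp)]; omega
      | succ t =>
          have hK : (f a).length = K := h a (by simp)
          rw [List.getD_append_right _ _ _ _ (by rw [hK]; calc K ≤ t * K + K + k := by omega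
                                                                _ = (t+1) * K + k := by ring)]
          have : (t + 1) * K + k - (f a).length = t * K + k := by rw [hK]; calc (t+1)*K + k - K = t*K + K + k - K := by ring_nf
                                                                                              _ = t*K + k := by omega
          rw [this]
          have := ih (fun x hx => h x (by simp [hx])) t k (by simpa using ht) hk
          simpa using this

theorem pv_flatMap_const_getD' {α : Type} (L : List α) (f : α → List Int)
    (K : Nat) (h : ∀ x ∈ L, (f x).length = K) :
    ∀ (t k : Nat) (ht : t < L.length), k < K →
      (L.flatMap f).getD (t * K + k) 0 = (f L[t]).getD k 0 := by
  induction L with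
  | nil => intro t k ht; simp at ht
  | cons a L ih =>
      intro t k ht hk
      rw [List.flatMap_cons]
      cases t with
      | zero =>
          rw [List.getD_append]
          · simp
          · rw [h a (by simp)]; omega
      | succ t =>
          have hK : (f a).length = K := h a (by simp)
          rw [List.getD_append_right _ _ _ _ (by rw [hK]; calc K ≤ t * K + K + k := by omega
                                                                _ = (t+1) * K + k := by ring)]
          have : (t + 1) * K + k - (f a).length = t * K + k := by rw [hK]; calc (t+1)*K + k - K = t*K + K + k - K := by ring_nf
                                                                                              _ = t*K + k := by omega
          rw [this]
          have := ih (fun x hx => h x (by simp [hx])) t k (by simpa using ht) hk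
          simpa using this

theorem pvHead (xs : List (List Int)) (h : xs ≠ []) :
    (PySem.List.pyGet? xs 0).getD [] = xs.headI := by
  cases xs with
  | nil => simp at h
  | cons a l => simp [PySem.List.pyGet?_zero_cons]

theorem pyRange_step (R B : Nat) (hR : 0 < R) :
    PySem.List.pyRange 0 ((R : Int) * (B : Int)) (R : Int) =
      (List.range B).map (fun r => ((R * r : Nat) : Int)) := by
  rw [PySem.List.pyRange_of_pos _ _ (by exact_mod_cast hR)]
  have hcount : (if (0:Int) < (R:Int) * (B:Int) then (((R:Int)*(B:Int) - 0 + R - 1) / R).toNat else 0) = B := by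
    by_cases hB : 0 < B
    · rw [if_pos (by positivity)]
      have : ((R:Int)*(B:Int) - 0 + R - 1) = ((R:Int) - 1) + (R:Int) * (B:Int) := by ring
      rw [this, Int.add_mul_ediv_left _ _ (by exact_mod_cast hR.ne'),
        Int.ediv_eq_zero_of_lt (by omega) (by omega)]
      simp
    · have hB0 : B = 0 := by omega
      subst hB0; simp
  rw [hcount]
  apply List.map_congr_left
  intro k _
  push_cast
  ring

def pvU (bool_grid pattern : List (List Int)) : List (Int × Int × Int) :=
  let R : Int := pattern.length
  let C : Int := pattern.headI.length
  let Bn : Int := bool_grid.length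
  let bC : Int := bool_grid.headI.length
  (PySem.List.pyRange 0 (R * Bn) R).flatMap (fun i =>
    (PySem.List.pyRange 0 (C * bC) C).flatMap (fun j =>
      if PySem.List.pyGetD ((PySem.List.pyGet? bool_grid (PySem.Int.floordiv i R)).getD []) (PySem.Int.floordiv j C) 0 = 0 then []
      else (PySem.List.pyRange i (i + R) 1).flatMap (fun pi =>
        (PySem.List.pyRange j (j + C) 1).map (fun pj =>
          (pi, pj, PySem.List.pyGetD ((PySem.List.pyGet? pattern (PySem.Int.mod pi R)).getD []) (PySem.Int.mod pj C) 0)))))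

theorem pvApply_flatMap {α : Type} (L : List α) (f : α → List (Int × Int × Int)) (g0 : List (List Int)) :
    pvApply g0 (L.flatMap f) = L.foldl (fun g x => pvApply g (f x)) g0 := by
  simp [pvApply, List.foldl_flatMap]

theorem pvApply_map {α : Type} (L : List α) (f : α → Int × Int × Int) (g0 : List (List Int)) :
    pvApply g0 (L.map f) = L.foldl (fun g x => pvSet2 g (f x).1 (f x).2.1 (f x).2.2) g0 := by
  simp [pvApply, List.foldl_map]

theorem pvApply_if (c : Prop) [Decidable c] (us : List (Int × Int × Int)) (g0 : List (List Int)) :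
    pvApply g0 (if c then [] else us) = if c then g0 else pvApply g0 us := by
  split <;> simp [pvApply]

theorem portA_eq (bool_grid pattern : List (List Int)) (hbg : bool_grid ≠ []) (hpat : pattern ≠ []) :
    duplicate_into_bool_grid bool_grid pattern =
      pvApply (List.replicate (pattern.length * bool_grid.length)
          (List.replicate (pattern.headI.length * bool_grid.headI.length) 0))
        (pvU bool_grid pattern) := by
  have hU : pvApply (List.replicate (pattern.length * bool_grid.length)
          (List.replicate (pattern.headI.length * bool_grid.headI.length) (0:Int)))
        (pvU bool_grid pattern) =
      (PySem.List.pyRange 0 ((pattern.length : Int) * (bool_grid.length : Int)) (pattern.length : Int)).foldl (fun g i =>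
        (PySem.List.pyRange 0 ((pattern.headI.length : Int) * (bool_grid.headI.length : Int)) (pattern.headI.length : Int)).foldl (fun g j =>
          if PySem.List.pyGetD ((PySem.List.pyGet? bool_grid (PySem.Int.floordiv i pattern.length)).getD []) (PySem.Int.floordiv j pattern.headI.length) 0 = 0 then g
          else
            (PySem.List.pyRange i (i + pattern.length) 1).foldl (fun g paint_i =>
              (PySem.List.pyRange j (j + pattern.headI.length) 1).foldl (fun g paint_j =>
                pvSet2 g paint_i paint_j
                  (PySem.List.pyGetD ((PySem.List.pyGet? pattern (PySem.Int.mod paint_i pattern.length)).getD []) (PySem.Int.mod paint_j pattern.headI.length) 0)) g) g) g)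
        (List.replicate (pattern.length * bool_grid.length)
          (List.replicate (pattern.headI.length * bool_grid.headI.length) 0)) := by
    unfold pvU
    simp only [pvApply_flatMap, pvApply_if, pvApply_map]
  have hlen : (PySem.List.pyRange 0 ((pattern.length : Int) * (bool_grid.length : Int)) 1).length = pattern.length * bool_grid.length := by
    rw [PySem.List.length_pyRange_one]; push_cast; omega
  have h1 : (((pattern.headI.length : Int) * (bool_grid.headI.length : Int))).toNat
      = pattern.headI.length * bool_grid.headI.length := by push_cast; omega
  have hbase : ((PySem.List.pyRange 0 ((pattern.length : Int) * (bool_grid.length : Int)) 1).map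
        (fun _ => List.replicate (((pattern.headI.length : Int) * (bool_grid.headI.length : Int))).toNat (0:Int))) =
      List.replicate (pattern.length * bool_grid.length)
        (List.replicate (pattern.headI.length * bool_grid.headI.length) 0) := by
    rw [h1]
    rw [show (fun (_ : Int) => List.replicate (pattern.headI.length * bool_grid.headI.length) (0:Int)) =
      Function.const Int (List.replicate (pattern.headI.length * bool_grid.headI.length) (0:Int)) from rfl]
    rw [List.map_const, hlen]
  simp only [duplicate_into_bool_grid]
  rw [pvHead _ hbg, pvHead _ hpat, hbase, hU]

theorem pv_flatMap_congr {α β : Type} {l : List α} {f g : α → List β}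
    (h : ∀ x ∈ l, f x = g x) : l.flatMap f = l.flatMap g := by
  induction l with
  | nil => rfl
  | cons a l ih =>
      simp only [List.flatMap_cons, h a (by simp),
        ih (fun x hx => h x (by simp [hx]))]

def pvV (bool_grid pattern : List (List Int)) : List (Int × Int × Int) :=
  let R := pattern.length
  let C := pattern.headI.length
  let Bn := bool_grid.length
  let bC := bool_grid.headI.length
  (List.range Bn).flatMap (fun r =>
    (List.range bC).flatMap (fun c =>
      if (bool_grid.getD r []).getD c 0 = 0 then []
      else (List.range R).flatMap (fun pi =>
        (List.range C).map (fun pj =>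
          (((R * r + pi : Nat) : Int), ((C * c + pj : Nat) : Int),
            (pattern.getD pi []).getD pj 0)))))

theorem pvRange_block (R : Nat) (hR : 0 < R) (a : Nat) :
    PySem.List.pyRange ((a : Int)) ((a : Int) + (R : Int)) 1 =
      (List.range R).map (fun k => ((a + k : Nat) : Int)) := by
  rw [PySem.List.pyRange_one]
  have : ((a : Int) + (R : Int) - (a : Int)).toNat = R := by omega
  rw [this]
  apply List.map_congr_left
  intro k _
  push_cast; ring

theorem pvU_eq_pvV (bool_grid pattern : List (List Int))
    (hR : 0 < pattern.length) (hC : 0 < pattern.headI.length) :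
    pvU bool_grid pattern = pvV bool_grid pattern := by
  simp only [pvU, pvV]
  rw [pyRange_step _ _ hR, List.flatMap_map]
  apply pv_flatMap_congr
  intro r hr
  rw [pyRange_step _ _ hC, List.flatMap_map]
  apply pv_flatMap_congr
  intro c hc
  have hfd1 : PySem.Int.floordiv (((pattern.length * r : Nat) : Int)) (pattern.length : Int) = ((r : Nat) : Int) := by
    rw [PySem.Int.floordiv_natCast, Nat.mul_div_cancel_left r hR]
  have hfd2 : PySem.Int.floordiv (((pattern.headI.length * c : Nat) : Int)) (pattern.headI.length : Int) = ((c : Nat) : Int) := by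
    rw [PySem.Int.floordiv_natCast, Nat.mul_div_cancel_left c hC]
  rw [hfd1, hfd2]
  simp only [PySem.List.pyGet?_natCast, PySem.List.pyGetD_natCast, ← List.getD_eq_getElem?_getD]
  congr 1
  rw [pvRange_block _ hR, List.flatMap_map]
  apply pv_flatMap_congr
  intro pi hpi
  rw [pvRange_block _ hC, List.map_map]
  apply List.map_congr_left
  intro pj hpj
  simp only [Function.comp]
  have hm1 : PySem.Int.mod (((pattern.length * r + pi : Nat) : Int)) (pattern.length : Int) = ((pi : Nat) : Int) := by
    rw [PySem.Int.mod_natCast]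
    congr 1
    rw [Nat.mul_add_mod]
    exact Nat.mod_eq_of_lt (List.mem_range.mp hpi)
  have hm2 : PySem.Int.mod (((pattern.headI.length * c + pj : Nat) : Int)) (pattern.headI.length : Int) = ((pj : Nat) : Int) := by
    rw [PySem.Int.mod_natCast]
    congr 1
    rw [Nat.mul_add_mod]
    exact Nat.mod_eq_of_lt (List.mem_range.mp hpj)
  rw [hm1, hm2]
  simp only [PySem.List.pyGet?_natCast, PySem.List.pyGetD_natCast, ← List.getD_eq_getElem?_getD]

theorem pv_map_eq_flatMap {α β : Type} (L : List α) (f : α → β) :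
    L.map f = L.flatMap (fun x => [f x]) := by
  induction L with
  | nil => rfl
  | cons a L ih => simp [ih]

theorem pvHit_single (u : Int × Int × Int) (p q : Int) :
    pvHit [u] p q = if u.1 = p ∧ u.2.1 = q then some u.2.2 else none := by
  show (pvHit [] p q).or _ = _
  simp [pvHit]

theorem pvHit_map_none {α : Type} (L : List α) (f : α → Int × Int × Int) (p q : Int)
    (h : ∀ x ∈ L, ¬((f x).1 = p ∧ (f x).2.1 = q)) : pvHit (L.map f) p q = none := by
  rw [pv_map_eq_flatMap]
  apply pvHit_flatMap_none
  intro x hx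
  rw [pvHit_single, if_neg (h x hx)]

theorem pvHit_map_range_single (f : Nat → Int × Int × Int) (p q : Int) (n x0 : Nat)
    (hx : x0 < n) (hmatch : (f x0).1 = p ∧ (f x0).2.1 = q)
    (hother : ∀ x, x < n → x ≠ x0 → ¬((f x).1 = p ∧ (f x).2.1 = q)) :
    pvHit ((List.range n).map f) p q = some (f x0).2.2 := by
  rw [pv_map_eq_flatMap]
  rw [pvHit_flatMap_range (fun x => [f x]) p q n x0 hx
    (fun x h1 h2 => by rw [pvHit_single, if_neg (hother x h1 h2)])]
  rw [pvHit_single, if_pos hmatch]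

theorem pvHit_pvV (bool_grid pattern : List (List Int))
    (hR : 0 < pattern.length) (hC : 0 < pattern.headI.length)
    (p q : Nat) (hp : p < pattern.length * bool_grid.length)
    (hq : q < pattern.headI.length * bool_grid.headI.length) :
    pvHit (pvV bool_grid pattern) (p : Int) (q : Int) =
      if (bool_grid.getD (p / pattern.length) []).getD (q / pattern.headI.length) 0 = 0
      then none
      else some ((pattern.getD (p % pattern.length) []).getD (q % pattern.headI.length) 0) := by
  set R := pattern.length with hRdef
  set C := pattern.headI.length with hCdef
  have hrow : p / R < bool_grid.length := by
    rw [Nat.div_lt_iff_lt_mul hR, Nat.mul_comm]; exact hp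
  have hcol : q / C < bool_grid.headI.length := by
    rw [Nat.div_lt_iff_lt_mul hC, Nat.mul_comm]; exact hq
  have hpmod : p % R < R := Nat.mod_lt _ hR
  have hqmod : q % C < C := Nat.mod_lt _ hC
  -- first coordinate of an update from block row r, pattern row pi
  have hfst : ∀ r pi : Nat, pi < R → (((R * r + pi : Nat) : Int) = (p : Int) ↔ (r = p / R ∧ pi = p % R)) := by
    intro r pi hpi
    constructor
    · intro h
      have h' : R * r + pi = p := by exact_mod_cast h
      have : (R * r + pi) / R = r := by rw [Nat.mul_add_div hR, Nat.div_eq_of_lt hpi]; omega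
      constructor
      · rw [← h', this]
      · rw [← h', Nat.mul_add_mod, Nat.mod_eq_of_lt hpi]
    · rintro ⟨rfl, rfl⟩
      exact_mod_cast Nat.div_add_mod p R
  have hsnd : ∀ c pj : Nat, pj < C → (((C * c + pj : Nat) : Int) = (q : Int) ↔ (c = q / C ∧ pj = q % C)) := by
    intro c pj hpj
    constructor
    · intro h
      have h' : C * c + pj = q := by exact_mod_cast h
      have : (C * c + pj) / C = c := by rw [Nat.mul_add_div hC, Nat.div_eq_of_lt hpj]; omega
      constructor
      · rw [← h', this]
      · rw [← h', Nat.mul_add_mod, Nat.mod_eq_of_lt hpj]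
    · rintro ⟨rfl, rfl⟩
      exact_mod_cast Nat.div_add_mod q C
  simp only [pvV, ← hRdef, ← hCdef]
  rw [pvHit_flatMap_range _ _ _ _ (p / R) hrow (by
    intro r hrB hrne
    apply pvHit_flatMap_none
    intro c _
    split
    · rfl
    · apply pvHit_flatMap_none
      intro pi hpi
      apply pvHit_map_none
      intro pj _
      intro hmm
      exact hrne (((hfst r pi (List.mem_range.mp hpi)).mp hmm.1).1))]
  rw [pvHit_flatMap_range _ _ _ _ (q / C) hcol (by
    intro c hcB hcne
    split
    · rfl
    · apply pvHit_flatMap_none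
      intro pi _
      apply pvHit_map_none
      intro pj hpj
      intro hmm
      exact hcne (((hsnd c pj (List.mem_range.mp hpj)).mp hmm.2).1))]
  split
  · rfl
  · rw [pvHit_flatMap_range _ _ _ _ (p % R) hpmod (by
      intro pi hpiR hpine
      apply pvHit_map_none
      intro pj _
      intro hmm
      exact hpine (((hfst (p / R) pi hpiR).mp hmm.1).2))]
    rw [pvHit_map_range_single _ _ _ _ (q % C) hqmod
      ⟨(hfst (p / R) (p % R) hpmod).mpr ⟨rfl, rfl⟩, (hsnd (q / C) (q % C) hqmod).mpr ⟨rfl, rfl⟩⟩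
      (fun pj hpjC hpjne hmm => hpjne (((hsnd (q / C) pj hpjC).mp hmm.2).2))]

theorem pvV_bounds (bool_grid pattern : List (List Int)) :
    ∀ u ∈ pvV bool_grid pattern,
      0 ≤ u.1 ∧ u.1 < ((pattern.length * bool_grid.length : Nat) : Int) ∧
      0 ≤ u.2.1 ∧ u.2.1 < ((pattern.headI.length * bool_grid.headI.length : Nat) : Int) := by
  intro u hu
  simp only [pvV, List.mem_flatMap, List.mem_range, List.mem_map] at hu
  obtain ⟨r, hr, c, hc, hu⟩ := hu
  by_cases hz : (bool_grid.getD r []).getD c 0 = 0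
  · rw [if_pos hz] at hu
    simp at hu
  · rw [if_neg hz] at hu
    simp only [List.mem_flatMap, List.mem_range, List.mem_map] at hu
    obtain ⟨pi, hpi, pj, hpj, rfl⟩ := hu
    refine ⟨by positivity, ?_, by positivity, ?_⟩
    · show ((pattern.length * r + pi : Nat) : Int) < _
      have : pattern.length * r + pi < pattern.length * bool_grid.length := by
        calc pattern.length * r + pi < pattern.length * r + pattern.length := by omega
          _ = pattern.length * (r + 1) := by ring
          _ ≤ pattern.length * bool_grid.length := Nat.mul_le_mul_left _ (by omega)
      exact_mod_cast this
    · show ((pattern.headI.length * c + pj : Nat) : Int) < _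
      have : pattern.headI.length * c + pj < pattern.headI.length * bool_grid.headI.length := by
        calc pattern.headI.length * c + pj < pattern.headI.length * c + pattern.headI.length := by omega
          _ = pattern.headI.length * (c + 1) := by ring
          _ ≤ pattern.headI.length * bool_grid.headI.length := Nat.mul_le_mul_left _ (by omega)
      exact_mod_cast this

theorem pv_base_shape (m n : Nat) :
    pvShape (List.replicate m (List.replicate n (0:Int))) m n := by
  refine ⟨by simp, fun t ht => ?_⟩
  rw [List.getD_replicate _ ht]
  simp

theorem entA (bool_grid pattern : List (List Int))
    (hbg : bool_grid ≠ []) (hpat : pattern ≠ []) (hC : 0 < pattern.headI.length)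
    (p q : Nat) (hp : p < pattern.length * bool_grid.length)
    (hq : q < pattern.headI.length * bool_grid.headI.length) :
    ((duplicate_into_bool_grid bool_grid pattern).getD p []).getD q 0 =
      if (bool_grid.getD (p / pattern.length) []).getD (q / pattern.headI.length) 0 = 0
      then 0
      else (pattern.getD (p % pattern.length) []).getD (q % pattern.headI.length) 0 := by
  have hR : 0 < pattern.length := List.length_pos_iff.mpr hpat
  rw [portA_eq _ _ hbg hpat, pvU_eq_pvV _ _ hR hC]
  rw [pvApply_ent (pvV bool_grid pattern) _ (pv_base_shape _ _)
    (fun u hu => by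
      have := pvV_bounds bool_grid pattern u hu
      push_cast at this ⊢
      exact ⟨this.1, this.2.1, this.2.2.1, this.2.2.2⟩) p q hp hq]
  rw [pvHit_pvV _ _ hR hC p q hp hq]
  rw [List.getD_replicate _ hp, List.getD_replicate _ hq]
  split <;> rfl

theorem shapeA (bool_grid pattern : List (List Int))
    (hbg : bool_grid ≠ []) (hpat : pattern ≠ []) (hC : 0 < pattern.headI.length) :
    pvShape (duplicate_into_bool_grid bool_grid pattern)
      (pattern.length * bool_grid.length)
      (pattern.headI.length * bool_grid.headI.length) := by
  have hR : 0 < pattern.length := List.length_pos_iff.mpr hpat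
  rw [portA_eq _ _ hbg hpat]
  exact pvApply_shape _ _ (pv_base_shape _ _)

def pvRow (pattern : List (List Int)) (C bC : Nat) (row : List Int) (pr : Nat) : List Int :=
  (row.take bC).flatMap (fun v => if v = 0 then List.replicate C (0:Int) else (pattern.getD pr []).take C)

theorem portB_eq (bool_grid pattern : List (List Int)) (hbg : bool_grid ≠ []) (hpat : pattern ≠ []) :
    duplicate_into_bool_grid_alt bool_grid pattern =
      bool_grid.flatMap (fun row => (List.range pattern.length).map
        (pvRow pattern pattern.headI.length bool_grid.headI.length row)) := by
  simp only [duplicate_into_bool_grid_alt]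
  rw [pvHead _ hbg, pvHead _ hpat]
  simp only [PySem.List.foldl_append_eq_flatMap, PySem.List.foldl_append_singleton_eq_map,
    List.nil_append, pvRow]
  apply pv_flatMap_congr
  intro row _
  rw [← pv_map_eq_flatMap]
  rfl

theorem lenRow (bool_grid pattern : List (List Int))
    (hbrow : ∀ row ∈ bool_grid, bool_grid.headI.length ≤ row.length)
    (hprow : ∀ row ∈ pattern, pattern.headI.length ≤ row.length)
    (row : List Int) (hrow : row ∈ bool_grid) (pr : Nat) (hpr : pr < pattern.length) :
    (pvRow pattern pattern.headI.length bool_grid.headI.length row pr).length =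
      pattern.headI.length * bool_grid.headI.length := by
  unfold pvRow
  rw [pv_flatMap_const_length _ _ pattern.headI.length (fun v _ => by
    split
    · simp
    · rw [List.length_take]
      have hmem : pattern.getD pr [] ∈ pattern := by
        rw [List.getD_eq_getElem _ _ hpr]
        exact List.getElem_mem hpr
      have := hprow _ hmem
      omega)]
  rw [List.length_take]
  have := hbrow _ hrow
  have : min bool_grid.headI.length row.length = bool_grid.headI.length := by omega
  rw [this, Nat.mul_comm]

theorem shapeB (bool_grid pattern : List (List Int)) (hbg : bool_grid ≠ []) (hpat : pattern ≠ [])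
    (hbrow : ∀ row ∈ bool_grid, bool_grid.headI.length ≤ row.length)
    (hprow : ∀ row ∈ pattern, pattern.headI.length ≤ row.length) :
    pvShape (duplicate_into_bool_grid_alt bool_grid pattern)
      (pattern.length * bool_grid.length)
      (pattern.headI.length * bool_grid.headI.length) := by
  have hR : 0 < pattern.length := List.length_pos_iff.mpr hpat
  rw [portB_eq _ _ hbg hpat]
  have hlen : ∀ row ∈ bool_grid, ((List.range pattern.length).map
      (pvRow pattern pattern.headI.length bool_grid.headI.length row)).length = pattern.length := by
    intro row _; simp
  constructor
  · rw [pv_flatMap_const_length _ _ _ hlen, Nat.mul_comm]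
  · intro t ht
    have hdec : (t / pattern.length) * pattern.length + t % pattern.length = t :=
      Nat.div_add_mod' t pattern.length
    have htB : t / pattern.length < bool_grid.length := by
      rw [Nat.div_lt_iff_lt_mul hR, Nat.mul_comm]; exact ht
    have hmod : t % pattern.length < pattern.length := Nat.mod_lt _ hR
    rw [← hdec, pv_flatMap_const_getD _ _ _ hlen _ _ htB hmod,
      PySem.List.getD_map_range _ _ _ _ hmod]
    exact lenRow _ _ hbrow hprow _ (List.getElem_mem htB) _ hmod

theorem entB (bool_grid pattern : List (List Int)) (hbg : bool_grid ≠ []) (hpat : pattern ≠ [])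
    (hC : 0 < pattern.headI.length)
    (hbrow : ∀ row ∈ bool_grid, bool_grid.headI.length ≤ row.length)
    (hprow : ∀ row ∈ pattern, pattern.headI.length ≤ row.length)
    (p q : Nat) (hp : p < pattern.length * bool_grid.length)
    (hq : q < pattern.headI.length * bool_grid.headI.length) :
    ((duplicate_into_bool_grid_alt bool_grid pattern).getD p []).getD q 0 =
      if (bool_grid.getD (p / pattern.length) []).getD (q / pattern.headI.length) 0 = 0
      then 0
      else (pattern.getD (p % pattern.length) []).getD (q % pattern.headI.length) 0 := by
  have hR : 0 < pattern.length := List.length_pos_iff.mpr hpat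
  set R := pattern.length with hRdef
  set C := pattern.headI.length with hCdef
  have hpB : p / R < bool_grid.length := by rw [Nat.div_lt_iff_lt_mul hR, Nat.mul_comm]; exact hp
  have hqB : q / C < bool_grid.headI.length := by rw [Nat.div_lt_iff_lt_mul hC, Nat.mul_comm]; exact hq
  have hpm : p % R < R := Nat.mod_lt _ hR
  have hqm : q % C < C := Nat.mod_lt _ hC
  rw [portB_eq _ _ hbg hpat]
  have hlen : ∀ row ∈ bool_grid, ((List.range R).map
      (pvRow pattern C bool_grid.headI.length row)).length = R := by intro row _; simp
  have hdecp : (p / R) * R + p % R = p := Nat.div_add_mod' p R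
  have e1 : ((bool_grid.flatMap (fun row => (List.range R).map
      (pvRow pattern C bool_grid.headI.length row))).getD p []) =
      pvRow pattern C bool_grid.headI.length (bool_grid[p / R]'hpB) (p % R) := by
    conv_lhs => rw [← hdecp]
    rw [pv_flatMap_const_getD _ _ _ hlen _ _ hpB hpm,
      PySem.List.getD_map_range _ _ _ _ hpm]
  rw [e1]
  -- now inside the row
  set row : List Int := bool_grid[p / R] with hrowdef
  have hrowmem : row ∈ bool_grid := List.getElem_mem hpB
  have hrowlen : (row.take bool_grid.headI.length).length = bool_grid.headI.length := by
    rw [List.length_take]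
    have := hbrow _ hrowmem
    omega
  unfold pvRow
  have hchunk : ∀ v ∈ row.take bool_grid.headI.length,
      ((if v = 0 then List.replicate C (0:Int) else (pattern.getD (p % R) []).take C)).length = C := by
    intro v _
    split
    · simp
    · rw [List.length_take]
      have hmem : pattern.getD (p % R) [] ∈ pattern := by
        rw [List.getD_eq_getElem _ _ hpm]
        exact List.getElem_mem hpm
      have := hprow _ hmem
      omega
  have hdecq : (q / C) * C + q % C = q := Nat.div_add_mod' q C
  conv_lhs => rw [← hdecq]
  rw [pv_flatMap_const_getD' _ _ _ hchunk _ _ (by rw [hrowlen]; exact hqB) hqm]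
  have htake : (row.take bool_grid.headI.length)[q / C]'(by rw [hrowlen]; exact hqB) = row[q / C]'(by have := hbrow _ hrowmem; omega) :=
    List.getElem_take
  rw [htake]
  have hcell : (bool_grid.getD (p / R) []).getD (q / C) 0 = row[q / C]'(by have := hbrow _ hrowmem; omega) := by
    rw [List.getD_eq_getElem _ _ hpB, ← hrowdef, List.getD_eq_getElem _ _ (by have := hbrow _ hrowmem; omega)]
  rw [hcell]
  split
  · rw [List.getD_replicate _ hqm]
  · set pl := pattern.getD (p % R) [] with hpl
    have hplen : C ≤ pl.length := by
      have hmem : pl ∈ pattern := by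
        rw [hpl, List.getD_eq_getElem _ _ hpm]
        exact List.getElem_mem hpm
      exact hprow _ hmem
    rw [List.getD_eq_getElem (pl.take C) 0 (by rw [List.length_take]; omega),
      List.getD_eq_getElem pl 0 (by omega)]
    exact List.getElem_take

theorem pv_getElem_ent (g : List (List Int)) (p q : Nat) (h1 : p < g.length)
    (h2 : q < (g[p]'h1).length) :
    (g[p]'h1)[q]'h2 = (g.getD p []).getD q 0 := by
  rw [List.getD_eq_getElem _ _ h1]
  rw [List.getD_eq_getElem _ _ h2]

theorem pv_final (bool_grid pattern : List (List Int))
    (hbg : bool_grid ≠ []) (hpat : pattern ≠ []) (hC : 0 < pattern.headI.length)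
    (hbrow : ∀ row ∈ bool_grid, bool_grid.headI.length ≤ row.length)
    (hprow : ∀ row ∈ pattern, pattern.headI.length ≤ row.length) :
    duplicate_into_bool_grid bool_grid pattern = duplicate_into_bool_grid_alt bool_grid pattern := by
  have sA := shapeA bool_grid pattern hbg hpat hC
  have sB := shapeB bool_grid pattern hbg hpat hbrow hprow
  apply List.ext_getElem (by rw [sA.1, sB.1])
  intro p h1 h2
  have hp : p < pattern.length * bool_grid.length := by rw [← sA.1]; exact h1
  have lA : ((duplicate_into_bool_grid bool_grid pattern)[p]'h1).length =
      pattern.headI.length * bool_grid.headI.length := by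
    rw [← List.getD_eq_getElem _ [] h1]; exact sA.2 p hp
  have lB : ((duplicate_into_bool_grid_alt bool_grid pattern)[p]'h2).length =
      pattern.headI.length * bool_grid.headI.length := by
    rw [← List.getD_eq_getElem _ [] h2]; exact sB.2 p hp
  apply List.ext_getElem (by rw [lA, lB])
  intro q hq1 hq2
  have hq : q < pattern.headI.length * bool_grid.headI.length := by rw [← lA]; exact hq1
  rw [pv_getElem_ent _ _ _ h1 hq1, pv_getElem_ent _ _ _ h2 hq2]
  rw [entA bool_grid pattern hbg hpat hC p q hp hq,
    entB bool_grid pattern hbg hpat hC hbrow hprow p q hp hq]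

-- ===== VERDICT (by name: the statement is the Claim_ definition above) =====
theorem duplicate_into_bool_grid_spec : Claim_equal_duplicate_into_bool_grid := by
  intro bool_grid pattern _ hpre
  obtain ⟨hbg, hpat, hC, hbrow, hprow⟩ := hpre
  unfold Spec_duplicate_into_bool_grid
  exact pv_final bool_grid pattern hbg hpat hC hbrow hprow
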